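-- pv_equiv track=rewrite | github.com/sweisser15/Algorithms_and_DataStructures | Cipher.py | fillBlockEn
-- ===== SOURCE A (Python) =====
-- def fillBlockEn(userWord, blockSize):
--
--         #this function fills in the block for encryption with the appriopriate word and block size
--         wordList = []
--         for letter in userWord:
--             wordList.append(letter)
--         yList = []
--         n = 0
--
--         #this loop adds values to the block, and adds a * for each space in which the block is longer than the word
--         for y in range(blockSize):
--             xList = []
--             for x in range(blockSize):
--                 if n > len(wordList) - 1:
--                     xList.append('*')
--                 else:
--                     xList.append(wordList[n])
--                 n += 1
--             yList.append(xList)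
--         return yList
-- ===== SOURCE B (Python) =====
-- def fillBlockEn(userWord, blockSize):
--     # non-positive size: empty grid
--     if blockSize <= 0:
--         return []
--     # build the flat cell list once, then chunk it into rows
--     flat = list(userWord) + ['*'] * (blockSize * blockSize - len(userWord))
--     return [flat[i * blockSize:(i + 1) * blockSize] for i in range(blockSize)]
-- ===== Notes on version B (the rewrite author's own statement) =====
-- stated objective: simpler
-- what changed: Replaces the nested counting loops with their shared running index and per-cell conditional by building the flat padded cell list once and chunking it into rows by slicing.
import Mathlib
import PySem

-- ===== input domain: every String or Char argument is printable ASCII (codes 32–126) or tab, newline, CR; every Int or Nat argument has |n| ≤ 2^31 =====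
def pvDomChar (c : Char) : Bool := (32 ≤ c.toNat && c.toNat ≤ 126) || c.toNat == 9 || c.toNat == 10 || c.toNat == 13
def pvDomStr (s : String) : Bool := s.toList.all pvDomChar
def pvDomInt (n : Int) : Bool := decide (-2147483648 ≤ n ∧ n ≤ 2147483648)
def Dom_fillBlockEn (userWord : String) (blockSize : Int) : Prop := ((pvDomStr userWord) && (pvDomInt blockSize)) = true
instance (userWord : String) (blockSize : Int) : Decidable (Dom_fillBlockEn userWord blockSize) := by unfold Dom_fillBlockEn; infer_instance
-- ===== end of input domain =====

-- B builds the flat padded cell list once and slices it into rows, instead of A's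
-- nested counting loops with a shared running index and per-cell conditional (objective: simpler).

-- ===== PORT A =====
def fillBlockEn (userWord : String) (blockSize : Int) : List (List String) :=
  let wordList : List String :=
    userWord.toList.foldl (fun acc c => acc ++ [String.ofList [c]]) []
  let res :=
    (PySem.List.pyRange 0 blockSize 1).foldl
      (fun (st : List (List String) × Int) _y =>
        let inner :=
          (PySem.List.pyRange 0 blockSize 1).foldl
            (fun (st2 : List String × Int) _x =>
              (if st2.2 > (wordList.length : Int) - 1 then st2.1 ++ ["*"]
               -- wordList[n]: n is always a valid index in this branch, so getD's default is never used
               else st2.1 ++ [(PySem.List.pyGet? wordList st2.2).getD ""],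
               st2.2 + 1))
            (([] : List String), st.2)
        (st.1 ++ [inner.1], inner.2))
      (([] : List (List String)), (0 : Int))
  res.1

-- ===== PORT B =====
def fillBlockEn_alt (userWord : String) (blockSize : Int) : List (List String) :=
  if blockSize ≤ 0 then [] else
  let flat : List String :=
    userWord.toList.map (fun c => String.ofList [c]) ++
      List.replicate (blockSize * blockSize - (userWord.toList.length : Int)).toNat "*"
  (PySem.List.pyRange 0 blockSize 1).map
    (fun i => PySem.List.slice flat (some (i * blockSize)) (some ((i + 1) * blockSize)))

-- ===== PRECONDITION & SPEC =====
def Spec_fillBlockEn (userWord : String) (blockSize : Int) (out : List (List String)) : Prop := out = fillBlockEn_alt userWord blockSize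
instance (userWord : String) (blockSize : Int) (out : List (List String)) : Decidable (Spec_fillBlockEn userWord blockSize out) := by unfold Spec_fillBlockEn; infer_instance

-- ===== CLAIM (what is proved, stated in full; the proofs are below) =====
def Claim_equal_fillBlockEn : Prop := ∀ (userWord : String) (blockSize : Int), Dom_fillBlockEn userWord blockSize → Spec_fillBlockEn userWord blockSize (fillBlockEn userWord blockSize)

-- ===== LEMMAS AND PROOFS =====

-- A's first loop builds the list of one-character strings
theorem pv_foldl_map {α β : Type} (g : α → β) (xs : List α) (acc : List β) :
    xs.foldl (fun a c => a ++ [g c]) acc = acc ++ xs.map g := by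
  induction xs generalizing acc with
  | nil => simp
  | cons x xs ih => simp [List.foldl_cons, ih]

-- getD into the padded flat list is getD into the word with default "*"
theorem pv_getD_pad (w : List String) (pad n : Nat) :
    (w ++ List.replicate pad "*").getD n "*" = w.getD n "*" := by
  rcases lt_or_ge n w.length with h | h
  · simp [List.getD_eq_getElem?_getD, List.getElem?_append_left h]
  · simp [List.getD_eq_getElem?_getD, List.getElem?_append_right h,
      List.getElem?_replicate, List.getElem?_eq_none (by omega : w.length ≤ n)]
    split <;> rfl

-- a fully in-range drop/take chunk, written index-wise
theorem pv_drop_take_map {α : Type} [Inhabited α] (xs : List α) (d : α) (s n : Nat)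
    (h : s + n ≤ xs.length) :
    (xs.drop s).take n = (List.range n).map (fun j => xs.getD (s + j) d) := by
  apply List.ext_getElem
  · simp; omega
  · intro j h1 h2
    have hj : j < n := by simpa using h2
    have : s + j < xs.length := by omega
    simp [List.getElem_take, List.getElem_drop, List.getD_eq_getElem?_getD,
      List.getElem?_eq_getElem this]

-- A's inner loop, characterised: the range values are ignored, only the length counts
theorem pv_innerA (w : List String) (l : List Int) (acc : List String) (n0 : Nat) :
    l.foldl
      (fun (st2 : List String × Int) _x =>
        (if st2.2 > (w.length : Int) - 1 then st2.1 ++ ["*"]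
         else st2.1 ++ [(PySem.List.pyGet? w st2.2).getD ""],
         st2.2 + 1))
      (acc, (n0 : Int))
    = (acc ++ (List.range l.length).map (fun j => w.getD (n0 + j) "*"),
       ((n0 + l.length : Nat) : Int)) := by
  induction l generalizing acc n0 with
  | nil => simp
  | cons x l ih =>
    have hstep : (if (n0 : Int) > (w.length : Int) - 1 then acc ++ ["*"]
        else acc ++ [(PySem.List.pyGet? w (n0 : Int)).getD ""]) = acc ++ [w.getD n0 "*"] := by
      split
      · rename_i h
        have hle : w.length ≤ n0 := by omega
        simp [List.getD_eq_getElem?_getD, List.getElem?_eq_none hle]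
      · rename_i h
        have hlt : n0 < w.length := by omega
        simp [List.getD_eq_getElem?_getD, PySem.List.pyGet?_natCast,
          List.getElem?_eq_getElem hlt]
    have hcast : ((n0 : Int) + 1) = ((n0 + 1 : Nat) : Int) := by push_cast; ring
    simp only [List.foldl_cons, hstep, hcast, ih]
    simp only [Prod.mk.injEq]
    constructor
    · rw [List.append_assoc]
      congr 1
      simp only [List.length_cons, List.range_succ_eq_map, List.map_cons, List.map_map,
        List.singleton_append, Nat.add_zero]
      congr 1
      apply List.map_congr_left
      intro a _
      simp only [Function.comp_apply]
      congr 1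
      omega
    · simp only [List.length_cons]
      push_cast
      ring
  
-- A's outer loop, characterised (m is the inner range list; only its length k matters)
theorem pv_outerA (w : List String) (k : Nat) (m : List Int) (hm : m.length = k)
    (l : List Int) (acc : List (List String)) (n0 : Nat) :
    l.foldl
      (fun (st : List (List String) × Int) _y =>
        (st.1 ++
          [(m.foldl
              (fun (st2 : List String × Int) _x =>
                (if st2.2 > (w.length : Int) - 1 then st2.1 ++ ["*"]
                 else st2.1 ++ [(PySem.List.pyGet? w st2.2).getD ""],
                 st2.2 + 1))
              (([] : List String), st.2)).1],
         (m.foldl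
            (fun (st2 : List String × Int) _x =>
              (if st2.2 > (w.length : Int) - 1 then st2.1 ++ ["*"]
               else st2.1 ++ [(PySem.List.pyGet? w st2.2).getD ""],
               st2.2 + 1))
            (([] : List String), st.2)).2))
      (acc, (n0 : Int))
    = (acc ++ (List.range l.length).map
        (fun i => (List.range k).map (fun j => w.getD (n0 + i * k + j) "*")),
       ((n0 + l.length * k : Nat) : Int)) := by
  induction l generalizing acc n0 with
  | nil => simp
  | cons x l ih =>
    simp only [List.foldl_cons]
    rw [pv_innerA w m [] n0]
    simp only [hm, List.nil_append]
    rw [ih]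
    simp only [Prod.mk.injEq]
    constructor
    · rw [List.append_assoc]
      congr 1
      simp only [List.length_cons, List.range_succ_eq_map, List.map_cons, List.map_map,
        List.singleton_append, Nat.add_zero, Nat.zero_mul]
      congr 1
      apply List.map_congr_left
      intro a _
      simp only [Function.comp_apply]
      apply List.map_congr_left
      intro b _
      congr 1
      simp only [Nat.succ_mul]
      omega
    · simp only [List.length_cons]
      push_cast
      ring

theorem fillBlockEn_spec_aux (userWord : String) (blockSize : Int) :
    fillBlockEn userWord blockSize = fillBlockEn_alt userWord blockSize := by
  by_cases hneg : blockSize ≤ 0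
  · simp [fillBlockEn, fillBlockEn_alt, hneg, PySem.List.pyRange_one_eq_nil hneg]
  · obtain ⟨k, hk⟩ : ∃ k : Nat, blockSize = (k : Nat) :=
      ⟨blockSize.toNat, by omega⟩
    subst hk
    unfold fillBlockEn fillBlockEn_alt
    rw [if_neg hneg]
    simp only [pv_foldl_map (fun c => String.ofList [c]) userWord.toList [], List.nil_append]
    set w : List String := userWord.toList.map (fun c => String.ofList [c]) with hw
    have hL : w.length = userWord.toList.length := by simp [hw]
    set flat : List String :=
      w ++ List.replicate ((k : Int) * (k : Int) - (userWord.toList.length : Int)).toNat "*"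
      with hflat
    have hflatlen : k * k ≤ flat.length := by
      simp only [hflat, List.length_append, List.length_replicate, hL]
      omega
    have houter := pv_outerA w k (PySem.List.pyRange 0 (k : Int) 1)
      (by rw [PySem.List.length_pyRange_one]; omega) (PySem.List.pyRange 0 (k : Int) 1) [] 0
    simp only [Nat.cast_zero] at houter
    rw [houter]
    rw [PySem.List.pyRange_zero_natCast]
    simp only [List.length_map, List.length_range, List.nil_append, List.map_map]
    apply List.map_congr_left
    intro i hi
    have hik : i < k := by simpa using hi
    simp only [Function.comp]
    rw [show ((i : Int) * (k : Int)) = ((i * k : Nat) : Int) by push_cast; ring]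
    rw [show (((i : Int) + 1) * (k : Int)) = (((i * k : Nat) : Int) + ((k : Nat) : Int)) by
      push_cast; ring]
    rw [PySem.List.slice_natCast_add]
    rw [pv_drop_take_map flat "*" (i * k) k (by nlinarith)]
    apply List.map_congr_left
    intro j _
    rw [hflat, pv_getD_pad]
    simp

-- ===== VERDICT (by name: the statement is the Claim_ definition above) =====
theorem fillBlockEn_spec : Claim_equal_fillBlockEn := by
  intro userWord blockSize _
  exact fillBlockEn_spec_aux userWord blockSize
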